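-- pv_equiv track=rewrite | github.com/FTHTrading/Bot-Kil | research/conviction_engine.py | _count_independent_groups
-- ===== SOURCE A (Python) =====
-- _INDEPENDENCE_GROUPS = {
--     "momentum":     {"crypto_momentum", "calendar_effect"},
--     "volatility":   {"crypto_vol_misprice"},
--     "orderflow":    {"volume_breakout", "open_interest_signal"},
--     "structural":   {"timedecay_exploit", "mean_reversion_fade", "cross_timeframe_arb"},
--     "fundamental":  {"econ_consensus", "fedwatch_arb", "polling_arb", "weather_forecast"},
-- }
--
-- def _count_independent_groups(strategy_names: list[str]) -> int:
--     """
--     Count how many independent evidence groups are represented.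
--     Returns a number from 0 (all same group) to len(groups) (all different).
--     """
--     seen = set()
--     for grp, members in _INDEPENDENCE_GROUPS.items():
--         for name in strategy_names:
--             if name in members:
--                 seen.add(grp)
--                 break
--     return len(seen)
-- ===== SOURCE B (Python) =====
-- _INDEPENDENCE_GROUPS = {
--     "momentum":     {"crypto_momentum", "calendar_effect"},
--     "volatility":   {"crypto_vol_misprice"},
--     "orderflow":    {"volume_breakout", "open_interest_signal"},
--     "structural":   {"timedecay_exploit", "mean_reversion_fade", "cross_timeframe_arb"},
--     "fundamental":  {"econ_consensus", "fedwatch_arb", "polling_arb", "weather_forecast"},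
-- }
--
-- _MEMBER_TO_GROUP = {
--     name: grp
--     for grp, members in _INDEPENDENCE_GROUPS.items()
--     for name in members
-- }
--
-- def _count_independent_groups(strategy_names: list[str]) -> int:
--     seen = set()
--     for name in strategy_names:
--         grp = _MEMBER_TO_GROUP.get(name)
--         if grp is not None:
--             seen.add(grp)
--     return len(seen)
-- ===== Notes on version B (the rewrite author's own statement) =====
-- stated objective: idiomatic
-- what changed: Replaces the group-by-group rescans of the input (5 nested scans with break) by a precomputed inverted index name->group and a single pass over strategy_names collecting groups in a set.
import Mathlib
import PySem

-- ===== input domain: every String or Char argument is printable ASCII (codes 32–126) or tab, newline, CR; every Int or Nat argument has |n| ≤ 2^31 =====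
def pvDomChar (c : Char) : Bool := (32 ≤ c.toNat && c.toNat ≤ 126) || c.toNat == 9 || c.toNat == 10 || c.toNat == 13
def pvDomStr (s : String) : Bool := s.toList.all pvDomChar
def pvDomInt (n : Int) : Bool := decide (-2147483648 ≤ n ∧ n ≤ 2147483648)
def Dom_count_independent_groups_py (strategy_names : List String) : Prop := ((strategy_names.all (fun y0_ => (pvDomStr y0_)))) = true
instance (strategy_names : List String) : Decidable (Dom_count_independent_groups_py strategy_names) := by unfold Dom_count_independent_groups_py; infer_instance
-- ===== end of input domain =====

-- B replaces A's per-group rescans of the input by a precomputed inverted index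
-- name -> group and a single pass over strategy_names (idiomatic; return value only).

-- ===== PORT A =====
-- _INDEPENDENCE_GROUPS: dict of group name -> set of member names (members used only for membership)
def pvGroups : List (String × PySem.Set String) :=
  [("momentum", ["crypto_momentum", "calendar_effect"]),
   ("volatility", ["crypto_vol_misprice"]),
   ("orderflow", ["volume_breakout", "open_interest_signal"]),
   ("structural", ["timedecay_exploit", "mean_reversion_fade", "cross_timeframe_arb"]),
   ("fundamental", ["econ_consensus", "fedwatch_arb", "polling_arb", "weather_forecast"])]

-- the inner 'for name in strategy_names: if name in members: seen.add(grp); break'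
def pvInnerA (grp : String) (members : PySem.Set String) (seen : PySem.Set String) :
    List String → PySem.Set String
  | [] => seen
  | name :: rest =>
      if PySem.Set.contains members name then PySem.Set.add seen grp
      else pvInnerA grp members seen rest

def count_independent_groups_py (strategy_names : List String) : Int :=
  PySem.Set.len
    (pvGroups.foldl (fun seen p => pvInnerA p.1 p.2 seen strategy_names) PySem.Set.empty)

-- ===== PORT B =====
-- _MEMBER_TO_GROUP = {name: grp for grp, members in _INDEPENDENCE_GROUPS.items() for name in members}
def pvMemberToGroup : PySem.Dict String String :=
  pvGroups.foldl
    (fun d p => p.2.foldl (fun d name => d.insert name p.1) d)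
    PySem.Dict.empty

def count_independent_groups_py_alt (strategy_names : List String) : Int :=
  PySem.Set.len
    (strategy_names.foldl
      (fun seen name =>
        match pvMemberToGroup.get? name with
        | some grp => PySem.Set.add seen grp
        | none => seen)
      PySem.Set.empty)

-- ===== PRECONDITION & SPEC =====
def Spec_count_independent_groups_py (strategy_names : List String) (out : Int) : Prop := out = count_independent_groups_py_alt strategy_names
instance (strategy_names : List String) (out : Int) : Decidable (Spec_count_independent_groups_py strategy_names out) := by unfold Spec_count_independent_groups_py; infer_instance

-- ===== CLAIM (what is proved, stated in full; the proofs are below) =====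
def Claim_equal_count_independent_groups_py : Prop := ∀ (strategy_names : List String), Dom_count_independent_groups_py strategy_names → Spec_count_independent_groups_py strategy_names (count_independent_groups_py strategy_names)

-- ===== LEMMAS AND PROOFS =====

lemma pvInnerA_eq (grp : String) (members : PySem.Set String) (seen : PySem.Set String)
    (ns : List String) :
    pvInnerA grp members seen ns =
      if ns.any (fun n => PySem.Set.contains members n) then PySem.Set.add seen grp else seen := by
  induction ns with
  | nil => simp [pvInnerA]
  | cons n rest ih =>
      by_cases h : n ∈ members <;>
        simp [pvInnerA, List.any_cons, ih, h]

-- B's accumulation loop = set of the successful lookups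
lemma pvAltFold_eq (ns : List String) (s : PySem.Set String) :
    ns.foldl
      (fun seen name =>
        match pvMemberToGroup.get? name with
        | some grp => PySem.Set.add seen grp
        | none => seen) s
    = PySem.Set.update s (ns.filterMap pvMemberToGroup.get?) := by
  induction ns generalizing s with
  | nil => rfl
  | cons n rest ih =>
      cases h : pvMemberToGroup.get? n <;>
        simp [h, ih, PySem.Set.update]

-- lookup in the inverted index ↔ membership in the corresponding group
set_option maxHeartbeats 2000000 in
lemma pvLookup_iff (n g : String) :
    pvMemberToGroup.get? n = some g ↔
      ∃ p ∈ pvGroups, g = p.1 ∧ n ∈ p.2 := by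
  simp only [pvMemberToGroup, pvGroups, List.foldl_cons, List.foldl_nil,
    PySem.Dict.get?_insert, PySem.Dict.get?_empty, List.mem_cons]
  split_ifs <;> simp_all [eq_comm]

-- membership in A's accumulated set of groups
lemma pvFoldA_mem (L : List (String × PySem.Set String)) (ns : List String)
    (s : PySem.Set String) (g : String) :
    g ∈ L.foldl (fun seen p => pvInnerA p.1 p.2 seen ns) s ↔
      g ∈ s ∨ ∃ p ∈ L, g = p.1 ∧ ∃ n ∈ ns, n ∈ p.2 := by
  induction L generalizing s with
  | nil => simp
  | cons p rest ih =>
      rw [List.foldl_cons, ih, pvInnerA_eq]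
      by_cases h : (ns.any fun n => PySem.Set.contains p.2 n) = true
      · rw [if_pos h]
        simp only [List.any_eq_true, PySem.Set.contains_iff] at h
        obtain ⟨n0, hn0, hm0⟩ := h
        simp only [PySem.Set.mem_add, List.mem_cons]
        constructor
        · rintro (⟨hs | rfl⟩ | ⟨q, hq, rfl, hn⟩)
          · exact Or.inl hs
          · exact Or.inr ⟨p, Or.inl rfl, rfl, n0, hn0, hm0⟩
          · exact Or.inr ⟨q, Or.inr hq, rfl, hn⟩
        · rintro (hs | ⟨q, hq | hq, rfl, hn⟩)
          · exact Or.inl (Or.inl hs)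
          · exact Or.inl (Or.inr (by rw [hq]))
          · exact Or.inr ⟨q, hq, rfl, hn⟩
      · rw [if_neg h]
        simp only [List.any_eq_true, PySem.Set.contains_iff, not_exists, not_and] at h
        simp only [List.mem_cons]
        constructor
        · rintro (hs | ⟨q, hq, rfl, hn⟩)
          · exact Or.inl hs
          · exact Or.inr ⟨q, Or.inr hq, rfl, hn⟩
        · rintro (hs | ⟨q, hq | hq, rfl, hn⟩)
          · exact Or.inl hs
          · obtain ⟨n1, hn1, hm1⟩ := hn
            exact absurd (by rw [hq] at hm1; exact hm1) (h n1 hn1)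
          · exact Or.inr ⟨q, hq, rfl, hn⟩

lemma pvFoldA_nodup (L : List (String × PySem.Set String)) (ns : List String)
    (s : PySem.Set String) (hs : s.Nodup) :
    (L.foldl (fun seen p => pvInnerA p.1 p.2 seen ns) s).Nodup := by
  induction L generalizing s with
  | nil => exact hs
  | cons p rest ih =>
      rw [List.foldl_cons, pvInnerA_eq]
      split_ifs
      · exact ih _ (PySem.Set.nodup_add _ _ hs)
      · exact ih _ hs

-- ===== VERDICT (by name: the statement is the Claim_ definition above) =====
theorem count_independent_groups_py_spec : Claim_equal_count_independent_groups_py := by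
  intro ns _
  show _ = _
  unfold count_independent_groups_py count_independent_groups_py_alt
  rw [pvAltFold_eq, PySem.Set.update_empty]
  have hperm :
      (pvGroups.foldl (fun seen p => pvInnerA p.1 p.2 seen ns) PySem.Set.empty).Perm
        (PySem.Set.ofList (ns.filterMap pvMemberToGroup.get?)) := by
    rw [List.perm_ext_iff_of_nodup
      (pvFoldA_nodup pvGroups ns PySem.Set.empty List.nodup_nil) (PySem.Set.nodup_ofList _)]
    intro g
    rw [pvFoldA_mem, PySem.Set.mem_ofList, List.mem_filterMap]
    constructor
    · rintro (hs | ⟨p, hp, rfl, n, hn, hm⟩)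
      · exact absurd hs (List.not_mem_nil)
      · exact ⟨n, hn, (pvLookup_iff n p.1).2 ⟨p, hp, rfl, hm⟩⟩
    · rintro ⟨n, hn, hg⟩
      obtain ⟨p, hp, rfl, hm⟩ := (pvLookup_iff n g).1 hg
      exact Or.inr ⟨p, hp, rfl, n, hn, hm⟩
  simp only [PySem.Set.len]
  exact congrArg _ hperm.length_eq
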